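-- pv_equiv track=rewrite | github.com/inis17/advent-2024 | day15/2.py | moveSideWay
-- ===== SOURCE A (Python) =====
-- def upPos(pos, dir):
--     return (pos[0]+dir[0], pos[1]+dir[1])
--
-- def getAt(grid, pos):
--     return grid[pos[0]][pos[1]]
--
-- def moveSideWay(pos, dir, grid):
--     movingPositions = []
--     nPos = upPos(pos, dir)
--     if getAt(grid, nPos) == '#':
--         return movingPositions
--     if getAt(grid, nPos) == '.':
--         movingPositions.append(pos)
--         return movingPositions
--     movingPositions += moveSideWay(nPos, dir, grid)
--     if len(movingPositions) != 0:
--         movingPositions += [pos]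
--     return movingPositions
-- ===== SOURCE B (Python) =====
-- def upPos(pos, dir):
--     return (pos[0]+dir[0], pos[1]+dir[1])
--
-- def getAt(grid, pos):
--     return grid[pos[0]][pos[1]]
--
-- def moveSideWay(pos, dir, grid):
--     # Phase 1: scan along the ray counting pushable cells until wall/gap.
--     # Phase 2: rebuild the positions farthest-first by closed-form arithmetic.
--     cur = pos
--     n = 0
--     while True:
--         cur = upPos(cur, dir)
--         c = getAt(grid, cur)
--         if c == '#':
--             return []
--         n += 1
--         if c == '.':
--             return [(pos[0] + i * dir[0], pos[1] + i * dir[1]) for i in range(n - 1, -1, -1)]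
-- ===== Notes on version B (the rewrite author's own statement) =====
-- stated objective: alternative
-- what changed: Replaces A's recursion that builds the result by appending on the way back with a forward counting scan of the ray followed by a closed-form descending comprehension that rebuilds the positions farthest-first.
import Mathlib
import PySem

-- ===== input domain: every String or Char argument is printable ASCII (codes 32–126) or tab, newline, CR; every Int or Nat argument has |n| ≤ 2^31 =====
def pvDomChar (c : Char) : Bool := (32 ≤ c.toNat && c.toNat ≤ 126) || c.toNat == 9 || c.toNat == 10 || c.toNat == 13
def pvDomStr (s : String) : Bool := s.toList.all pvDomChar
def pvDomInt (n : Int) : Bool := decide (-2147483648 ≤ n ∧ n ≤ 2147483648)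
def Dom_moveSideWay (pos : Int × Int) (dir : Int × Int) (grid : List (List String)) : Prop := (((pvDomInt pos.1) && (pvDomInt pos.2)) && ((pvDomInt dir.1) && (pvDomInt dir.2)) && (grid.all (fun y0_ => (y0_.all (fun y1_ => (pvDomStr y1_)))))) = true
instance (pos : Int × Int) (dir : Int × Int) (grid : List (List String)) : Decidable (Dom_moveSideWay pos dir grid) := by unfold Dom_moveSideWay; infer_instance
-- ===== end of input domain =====

-- B replaces A's recursion (collect-and-append on the way back) by a forward counting scan
-- followed by a closed-form comprehension that rebuilds the positions farthest-first.

-- ===== PORT A =====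
-- shared helpers of the Python module (both Source A and Source B define them verbatim)
def upPosL (pos : Int × Int) (dir : Int × Int) : Int × Int := (pos.1 + dir.1, pos.2 + dir.2)

-- getAt(grid, pos) = grid[pos[0]][pos[1]]; none = IndexError (excluded by Pre_)
def getAtL (grid : List (List String)) (p : Int × Int) : Option String :=
  (PySem.List.pyGet? grid p.1).bind (fun row => PySem.List.pyGet? row p.2)

-- fuel bound: A's recursion (and B's loop) either terminates within this many steps or the
-- Python raises (IndexError / RecursionError); both facts are outside Pre_, where fuel-out yields []
def pvFuel (grid : List (List String)) : Nat :=
  2 * grid.length + 2 * grid.foldl (fun m r => max m r.length) 0 + 1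

def moveSideWayF : Nat → (Int × Int) → (Int × Int) → List (List String) → List (Int × Int)
  | 0, _, _, _ => []      -- fuel exhausted: Python recursion would not have returned (outside Pre_)
  | fuel+1, pos, dir, grid =>
    let movingPositions : List (Int × Int) := []
    let nPos := upPosL pos dir
    match getAtL grid nPos with
    | none => []          -- IndexError in Python (outside Pre_)
    | some c =>
      if c = "#" then movingPositions
      else if c = "." then movingPositions ++ [pos]
      else
        let movingPositions := movingPositions ++ moveSideWayF fuel nPos dir grid
        if movingPositions.length ≠ 0 then movingPositions ++ [pos] else movingPositions

def moveSideWay (pos : Int × Int) (dir : Int × Int) (grid : List (List String)) : List (Int × Int) :=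
  moveSideWayF (pvFuel grid) pos dir grid

-- ===== PORT B =====
-- phase 1 of Source B: the while-loop that walks the ray counting pushable cells;
-- some n = the loop returned via the '.' branch after n steps; none = wall '#' (return [])
-- or IndexError / non-termination (outside Pre_, where A's port also yields [])
def scanB : Nat → (Int × Int) → (Int × Int) → List (List String) → Int → Option Int
  | 0, _, _, _, _ => none
  | fuel+1, cur, dir, grid, n =>
    let cur' := upPosL cur dir
    match getAtL grid cur' with
    | none => none
    | some c =>
      if c = "#" then none
      else
        let n' := n + 1
        if c = "." then some n'
        else scanB fuel cur' dir grid n'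

-- phase 2 of Source B: [(pos[0]+i*dir[0], pos[1]+i*dir[1]) for i in range(n-1, -1, -1)]
def moveSideWay_alt (pos : Int × Int) (dir : Int × Int) (grid : List (List String)) : List (Int × Int) :=
  match scanB (pvFuel grid) pos dir grid 0 with
  | none => []
  | some n => (PySem.List.pyRange (n - 1) (-1) (-1)).map
      (fun i => (pos.1 + i * dir.1, pos.2 + i * dir.2))

-- ===== PRECONDITION & SPEC =====
-- cell read at step k of the walk (k = 1, 2, …)
def rayCell (pos : Int × Int) (dir : Int × Int) (grid : List (List String)) (k : Nat) : Option String :=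
  getAtL grid (pos.1 + (k : Int) * dir.1, pos.2 + (k : Int) * dir.2)

def isMidCell (o : Option String) : Bool :=
  match o with
  | some s => !(s == "#") && !(s == ".")
  | none => false

def isTermCell (o : Option String) : Bool := o == some "#" || o == some "."

-- Pre_: the ray from pos along dir reaches a '#' or '.' cell while every cell before it exists
-- and is neither; exactly the inputs where the Python returns normally (otherwise it raises
-- IndexError, or RecursionError when dir = (0,0) never meets a terminator).  The bound pvFuel
-- is never the binding constraint on a returning input: a terminating walk stays inside the
-- grid, so it takes fewer than pvFuel steps.
def Pre_moveSideWay (pos : Int × Int) (dir : Int × Int) (grid : List (List String)) : Prop :=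
  ∃ k < pvFuel grid, 1 ≤ k ∧
    (∀ j < k, 1 ≤ j → isMidCell (rayCell pos dir grid j) = true) ∧
    isTermCell (rayCell pos dir grid k) = true

instance (pos : Int × Int) (dir : Int × Int) (grid : List (List String)) : Decidable (Pre_moveSideWay pos dir grid) := by unfold Pre_moveSideWay; infer_instance

def pvWitness_moveSideWay : (Int × Int) × (Int × Int) × List (List String) :=
  ((0, 0), (0, 1), [["@", "O", "."]])

def Spec_moveSideWay (pos : Int × Int) (dir : Int × Int) (grid : List (List String)) (out : List (Int × Int)) : Prop := out = moveSideWay_alt pos dir grid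
instance (pos : Int × Int) (dir : Int × Int) (grid : List (List String)) (out : List (Int × Int)) : Decidable (Spec_moveSideWay pos dir grid out) := by unfold Spec_moveSideWay; infer_instance

-- ===== CLAIM (what is proved, stated in full; the proofs are below) =====
def Claim_equal_moveSideWay : Prop := ∀ (pos : Int × Int) (dir : Int × Int) (grid : List (List String)), Dom_moveSideWay pos dir grid → Pre_moveSideWay pos dir grid → Spec_moveSideWay pos dir grid (moveSideWay pos dir grid)

-- ===== LEMMAS AND PROOFS =====

-- B's counter is an accumulator: shifting its start shifts the result
theorem scanB_shift (fuel : Nat) (cur dir : Int × Int) (grid : List (List String)) (n : Int) :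
    scanB fuel cur dir grid n = (scanB fuel cur dir grid 0).map (· + n) := by
  induction fuel generalizing cur n with
  | zero => simp [scanB]
  | succ fuel ih =>
    simp only [scanB]
    cases getAtL grid (upPosL cur dir) with
    | none => simp
    | some c =>
      simp only
      split_ifs with h1 h2
      · simp
      · simp [add_comm]
      · rw [ih _ (n + 1), ih _ (0 + 1)]
        cases scanB fuel (upPosL cur dir) dir grid 0
        · simp
        · simp; ring

theorem scanB_pos (fuel : Nat) (cur dir : Int × Int) (grid : List (List String)) (n m : Int)
    (h : scanB fuel cur dir grid n = some m) : n < m := by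
  induction fuel generalizing cur n with
  | zero => simp [scanB] at h
  | succ fuel ih =>
    simp only [scanB] at h
    cases hc : getAtL grid (upPosL cur dir) with
    | none => rw [hc] at h; simp at h
    | some c =>
      rw [hc] at h
      simp only at h
      split_ifs at h with h1 h2
      · simp only [Option.some.injEq] at h; omega
      · have := ih _ _ h; omega

-- A's recursive result, characterised through B's scan count
theorem moveSideWayF_eq_scan (fuel : Nat) (cur dir : Int × Int) (grid : List (List String)) :
    moveSideWayF fuel cur dir grid =
      match scanB fuel cur dir grid 0 with
      | none => []
      | some m => ((List.range m.toNat).map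
          (fun (i : Nat) => (cur.1 + (i : Int) * dir.1, cur.2 + (i : Int) * dir.2))).reverse := by
  induction fuel generalizing cur with
  | zero => simp [moveSideWayF, scanB]
  | succ fuel ih =>
    simp only [moveSideWayF, scanB]
    cases getAtL grid (upPosL cur dir) with
    | none => simp
    | some c =>
      by_cases h1 : c = "#"
      · simp [h1]
      · by_cases h2 : c = "."
        · simp [h2, List.range_succ]
        · simp only [if_neg h1, if_neg h2]
          rw [ih (upPosL cur dir), scanB_shift fuel (upPosL cur dir) dir grid (0 + 1)]
          cases hs : scanB fuel (upPosL cur dir) dir grid 0 with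
          | none => simp
          | some m =>
            have hm : 0 < m := scanB_pos fuel (upPosL cur dir) dir grid 0 m hs
            have hne : (([] : List (Int × Int)) ++ ((List.range m.toNat).map
                (fun (i : Nat) => ((upPosL cur dir).1 + (i : Int) * dir.1,
                           (upPosL cur dir).2 + (i : Int) * dir.2))).reverse).length ≠ 0 := by
              simp; omega
            rw [if_pos hne]
            simp only [Option.map_some, List.nil_append]
            have htn : (m + (0 + 1)).toNat = m.toNat + 1 := by omega
            rw [htn, List.range_succ_eq_map]
            simp only [List.map_cons, List.map_map, List.reverse_cons]
            congr 1
            · congr 1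
              apply List.map_congr_left
              intro i _
              simp only [Function.comp, upPosL, Prod.mk.injEq]
              push_cast
              constructor <;> ring
            · simp

-- bridging Source B's descending comprehension to the reversed ascending list
theorem pyRange_countdown_map {α : Type} (m : Int) (hm : 0 < m) (f : Int → α) :
    (PySem.List.pyRange (m - 1) (-1) (-1)).map f =
      ((List.range m.toNat).map (fun (i : Nat) => f (i : Int))).reverse := by
  rw [PySem.List.pyRange_neg_one]
  have hlen : (m - 1 - -1).toNat = m.toNat := by omega
  rw [hlen, ← List.map_reverse,
    show (List.range m.toNat).reverse = List.map (fun i => m.toNat - 1 - i) (List.range m.toNat)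
      from by rw [List.range_eq_range', List.reverse_range', ← List.range_eq_range']; simp,
    List.map_map, List.map_map]
  apply List.map_congr_left
  intro i hi
  simp only [Function.comp]
  congr 1
  rw [List.mem_range] at hi
  omega

-- ===== VERDICT (by name: the statement is the Claim_ definition above) =====
theorem moveSideWay_spec : Claim_equal_moveSideWay := by
  intro pos dir grid _ _
  unfold Spec_moveSideWay moveSideWay moveSideWay_alt
  rw [moveSideWayF_eq_scan]
  cases hs : scanB (pvFuel grid) pos dir grid 0 with
  | none => rfl
  | some m =>
    have hm : 0 < m := scanB_pos (pvFuel grid) pos dir grid 0 m hs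
    simp only
    rw [pyRange_countdown_map m hm]
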